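-- pv_equiv track=rewrite | github.com/omarsaouri/column-intelligence | src/column_intelligence/signals/date_like.py | compute_year_range_span
-- ===== SOURCE A (Python) =====
-- def compute_year_range_span(values: list[str]) -> float:
--     years = []
--     for v in values:
--         try:
--             years.append(int(str(v)[:4]))
--         except Exception:
--             pass
--     return max(years) - min(years) if years else 0
-- ===== SOURCE B (Python) =====
-- def compute_year_range_span(values: list[str]) -> float:
--     lo = None
--     hi = None
--     for v in values:
--         try:
--             y = int(str(v)[:4])
--         except Exception:
--             continue
--         if lo is None or y < lo:
--             lo = y
--         if hi is None or hi < y: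
--             hi = y
--     return hi - lo if lo is not None else 0
-- ===== Notes on version B (the rewrite author's own statement) =====
-- stated objective: alternative
-- what changed: B keeps two running extrema (lo/hi) in a single pass instead of materialising a list of parsed years and reducing it twice with max() and min().
import Mathlib
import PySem

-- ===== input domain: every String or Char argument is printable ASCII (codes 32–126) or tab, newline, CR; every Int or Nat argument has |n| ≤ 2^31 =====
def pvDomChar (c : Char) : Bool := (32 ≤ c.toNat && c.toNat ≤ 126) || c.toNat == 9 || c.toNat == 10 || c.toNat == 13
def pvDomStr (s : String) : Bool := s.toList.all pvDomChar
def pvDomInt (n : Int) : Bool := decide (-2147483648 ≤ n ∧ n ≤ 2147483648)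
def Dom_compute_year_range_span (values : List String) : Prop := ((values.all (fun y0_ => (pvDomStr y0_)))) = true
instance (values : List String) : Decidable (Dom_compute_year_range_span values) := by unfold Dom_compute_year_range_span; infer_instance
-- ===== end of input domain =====

-- B maintains two running extrema in one pass instead of building the list of years and reducing it twice.

-- shared per-value parse: int(str(v)[:4]); none = the exception the 'except' swallows
def parseYear4 (v : String) : Option Int :=
  PySem.Int.ofStr? (PySem.Str.slice v none (some 4))

-- ===== PORT A =====
def compute_year_range_span (values : List String) : Int :=
  let years := values.foldl (fun acc v =>
    match parseYear4 v with
    | some y => acc ++ [y]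
    | none => acc) []
  match PySem.List.max? years (fun y => y), PySem.List.min? years (fun y => y) with
  | some hi, some lo => hi - lo
  | _, _ => 0

-- ===== PORT B =====
-- B's loop body: fold one value into the running (lo, hi) extrema (None = nothing seen yet)
def pvBstep (st : Option (Int × Int)) (v : String) : Option (Int × Int) :=
  match parseYear4 v with
  | none => st
  | some y =>
    match st with
    | none => some (y, y)
    | some (lo, hi) => some ((if y < lo then y else lo), (if hi < y then y else hi))

def compute_year_range_span_alt (values : List String) : Int :=
  match values.foldl pvBstep none with
  | none => 0
  | some (lo, hi) => hi - lo

-- ===== PRECONDITION & SPEC =====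
def Spec_compute_year_range_span (values : List String) (out : Int) : Prop := out = compute_year_range_span_alt values
instance (values : List String) (out : Int) : Decidable (Spec_compute_year_range_span values out) := by unfold Spec_compute_year_range_span; infer_instance

-- ===== CLAIM (what is proved, stated in full; the proofs are below) =====
def Claim_equal_compute_year_range_span : Prop := ∀ (values : List String), Dom_compute_year_range_span values → Spec_compute_year_range_span values (compute_year_range_span values)

-- ===== LEMMAS AND PROOFS =====

-- A's list-building loop is an append of the filterMap of the parses
theorem pvA_fold_eq (values : List String) (acc : List Int) :
    values.foldl (fun acc v =>
      match parseYear4 v with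
      | some y => acc ++ [y]
      | none => acc) acc = acc ++ values.filterMap parseYear4 := by
  induction values generalizing acc with
  | nil => simp
  | cons v t ih =>
    cases h : parseYear4 v with
    | none => simp [List.foldl, h, ih]
    | some y => simp [List.foldl, h, ih]

-- B's extrema step on the parsed years only
def pvStep2 (st : Option (Int × Int)) (y : Int) : Option (Int × Int) :=
  match st with
  | none => some (y, y)
  | some (lo, hi) => some ((if y < lo then y else lo), (if hi < y then y else hi))

theorem pvB_fold_eq (values : List String) (st : Option (Int × Int)) :
    values.foldl pvBstep st = (values.filterMap parseYear4).foldl pvStep2 st := by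
  induction values generalizing st with
  | nil => simp
  | cons v t ih =>
    cases h : parseYear4 v with
    | none => simp [List.foldl, pvBstep, h, ih]
    | some y => simp [List.foldl, pvBstep, h, ih, pvStep2]

theorem pvStep2_some (t : List Int) (lo hi : Int) :
    t.foldl pvStep2 (some (lo, hi)) = some (t.foldl min lo, t.foldl max hi) := by
  induction t generalizing lo hi with
  | nil => rfl
  | cons y t ih =>
    have h1 : (if y < lo then y else lo) = min lo y := by omega
    have h2 : (if hi < y then y else hi) = max hi y := by omega
    simp only [List.foldl, pvStep2, h1, h2, ih]

-- ===== VERDICT (by name: the statement is the Claim_ definition above) =====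
theorem compute_year_range_span_spec : Claim_equal_compute_year_range_span := by
  intro values _
  unfold Spec_compute_year_range_span compute_year_range_span compute_year_range_span_alt
  rw [pvA_fold_eq, pvB_fold_eq]
  simp only [List.nil_append]
  cases h : values.filterMap parseYear4 with
  | nil => rfl
  | cons y t =>
    simp [PySem.List.max?_id_cons, PySem.List.min?_id_cons, List.foldl, pvStep2, pvStep2_some]
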